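-- pv_equiv track=rewrite | github.com/dStensland/LostCity | crawlers/scrape_place_specials.py | _normalize_day
-- ===== SOURCE A (Python) =====
-- from typing import Optional
--
-- DAY_ABBREV_ORDERED = ["mon", "tue", "wed", "thu", "fri", "sat", "sun"]
--
-- def _normalize_day(day_str: str) -> Optional[str]:
--     """Normalize a day abbreviation or full name to a 3-letter abbreviated key."""
--     d = day_str.strip().lower().rstrip(".")
--     # Map full names and common abbreviations to canonical 3-letter keys
--     _FULL_TO_ABBREV = {
--         "monday": "mon",
--         "mondays": "mon",
--         "tuesday": "tue",
--         "tuesdays": "tue",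
--         "wednesday": "wed",
--         "wednesdays": "wed",
--         "thursday": "thu",
--         "thursdays": "thu",
--         "friday": "fri",
--         "fridays": "fri",
--         "saturday": "sat",
--         "saturdays": "sat",
--         "sunday": "sun",
--         "sundays": "sun",
--     }
--     if d in _FULL_TO_ABBREV:
--         return _FULL_TO_ABBREV[d]
--     for abbrev in DAY_ABBREV_ORDERED:
--         if d == abbrev or d.startswith(abbrev):
--             return abbrev
--     return None
-- ===== SOURCE B (Python) =====
-- from typing import Optional
--
-- _DAY_KEYS = frozenset(("mon", "tue", "wed", "thu", "fri", "sat", "sun"))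
--
-- def _normalize_day(day_str: str) -> Optional[str]:
--     """Normalize a day abbreviation or full name to a 3-letter abbreviated key."""
--     d = day_str.strip().lower().rstrip(".")
--     key = d[:3]
--     return key if key in _DAY_KEYS else None
-- ===== Notes on version B (the rewrite author's own statement) =====
-- stated objective: simpler
-- what changed: Replaces the 14-entry full-name dictionary plus the seven-step startswith loop with a single 3-character prefix slice and one frozenset membership test, relying on the fact that every accepted form is determined exactly by its first three letters.
import Mathlib
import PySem

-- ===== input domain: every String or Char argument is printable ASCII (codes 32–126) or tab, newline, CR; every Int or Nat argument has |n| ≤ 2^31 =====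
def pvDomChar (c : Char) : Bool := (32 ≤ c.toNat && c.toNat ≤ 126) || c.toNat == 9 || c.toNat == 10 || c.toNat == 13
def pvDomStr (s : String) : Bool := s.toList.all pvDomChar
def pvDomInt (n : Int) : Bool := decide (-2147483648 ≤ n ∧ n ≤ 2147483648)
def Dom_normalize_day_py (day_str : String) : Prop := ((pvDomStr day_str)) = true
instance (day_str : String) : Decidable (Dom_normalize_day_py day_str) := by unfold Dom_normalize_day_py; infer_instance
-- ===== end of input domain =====

-- B replaces A's 14-entry full-name dictionary and 7-step startswith loop by one
-- 3-character prefix slice plus one membership test (objective: simpler).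

-- hand port of Python's s.rstrip("."), used identically by both sources: drop all
-- trailing '.' characters (exact; PySem has no rstrip-with-argument primitive)
def pvRstripDot (s : String) : String := String.ofList ((s.toList.reverse.dropWhile (fun c => c == '.')).reverse)

-- ===== PORT A =====
def DAY_ABBREV_ORDERED : List String := ["mon", "tue", "wed", "thu", "fri", "sat", "sun"]

def pvFullToAbbrev : PySem.Dict String String := PySem.Dict.ofList
  [("monday", "mon"), ("mondays", "mon"), ("tuesday", "tue"), ("tuesdays", "tue"),
   ("wednesday", "wed"), ("wednesdays", "wed"), ("thursday", "thu"), ("thursdays", "thu"),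
   ("friday", "fri"), ("fridays", "fri"), ("saturday", "sat"), ("saturdays", "sat"),
   ("sunday", "sun"), ("sundays", "sun")]

def pvDayLoop (d : String) : List String → Option String
  | [] => none
  | a :: rest =>
      if d == a || PySem.Str.startswith d a then some a else pvDayLoop d rest

def normalize_day_py (day_str : String) : Option String :=
  let d := pvRstripDot (PySem.Str.lower (PySem.Str.strip day_str))
  if pvFullToAbbrev.contains d then pvFullToAbbrev.get? d
  else pvDayLoop d DAY_ABBREV_ORDERED

-- ===== PORT B =====
def pvDayKeys : List String := ["mon", "tue", "wed", "thu", "fri", "sat", "sun"]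

def normalize_day_py_alt (day_str : String) : Option String :=
  let d := pvRstripDot (PySem.Str.lower (PySem.Str.strip day_str))
  let key := PySem.Str.slice d none (some 3)
  if pvDayKeys.contains key then some key else none

-- ===== PRECONDITION & SPEC =====
def Spec_normalize_day_py (day_str : String) (out : Option String) : Prop := out = normalize_day_py_alt day_str
instance (day_str : String) (out : Option String) : Decidable (Spec_normalize_day_py day_str out) := by unfold Spec_normalize_day_py; infer_instance

-- ===== CLAIM (what is proved, stated in full; the proofs are below) =====
def Claim_equal_normalize_day_py : Prop := ∀ (day_str : String), Dom_normalize_day_py day_str → Spec_normalize_day_py day_str (normalize_day_py day_str)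

-- ===== LEMMAS AND PROOFS =====

lemma pv_slice3_toList (d : String) : (PySem.Str.slice d none (some 3)).toList = d.toList.take 3 := by
  simp [PySem.Str.toList_slice]
  rw [show (3:Int) = ((3:Nat):Int) by norm_num, PySem.List.slice_to_natCast]



lemma pv_key_eq (d a : String) (h : d.toList.take 3 = a.toList) : PySem.Str.slice d none (some 3) = a := by
  have h2 := pv_slice3_toList d
  apply String.ext
  simpa [String.ext_iff, h] using h2

lemma pv_key_ne (d a : String) (h : d.toList.take 3 ≠ a.toList) :
    PySem.Str.slice d none (some 3) ≠ a := by
  intro he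
  exact h (by rw [← he, pv_slice3_toList])


lemma pv_starts_true (d : String) (a : List Char) (ha : a.length = 3)
    (h : d.toList.take 3 = a) : PySem.Chars.startswith d.toList a = true := by
  rw [PySem.Chars.startswith_iff, List.prefix_iff_eq_take, ha, ← h]

lemma pv_starts_false (d : String) (a : List Char) (ha : a.length = 3)
    (h : d.toList.take 3 ≠ a) : PySem.Chars.startswith d.toList a = false := by
  rw [Bool.eq_false_iff]
  intro hx
  rw [PySem.Chars.startswith_iff, List.prefix_iff_eq_take, ha] at hx
  exact h hx.symm

lemma pv_ne (d a : String) (ha : a.toList.length = 3) (h : d.toList.take 3 ≠ a.toList) : d ≠ a := by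
  rintro rfl
  exact h (List.take_of_length_le (by omega))

lemma pv_core (d : String) :
    (if pvFullToAbbrev.contains d then pvFullToAbbrev.get? d else pvDayLoop d DAY_ABBREV_ORDERED)
    = (if pvDayKeys.contains (PySem.Str.slice d none (some 3)) then some (PySem.Str.slice d none (some 3)) else none) := by
  cases hc : pvFullToAbbrev.contains d with
  | true =>
    have hmk : pvFullToAbbrev = PySem.Dict.mk
        [("monday", "mon"), ("mondays", "mon"), ("tuesday", "tue"), ("tuesdays", "tue"),
         ("wednesday", "wed"), ("wednesdays", "wed"), ("thursday", "thu"), ("thursdays", "thu"),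
         ("friday", "fri"), ("fridays", "fri"), ("saturday", "sat"), ("saturdays", "sat"),
         ("sunday", "sun"), ("sundays", "sun")] := by decide
    rw [hmk] at hc
    simp only [PySem.Dict.contains_mk, List.any_cons, List.any_nil, Bool.or_eq_true,
      beq_iff_eq, Bool.or_false] at hc
    rcases hc with h | h | h | h | h | h | h | h | h | h | h | h | h | h <;> subst h <;> decide
  | false =>
    rw [if_neg (by simp)]
    by_cases h1 : d.toList.take 3 = "mon".toList
    · rw [pv_key_eq d "mon" h1]
      simp [pvDayLoop, DAY_ABBREV_ORDERED, pvDayKeys,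
          pv_starts_true d ['m', 'o', 'n'] (by decide) (by simpa using h1)]
    ·
      by_cases h2 : d.toList.take 3 = "tue".toList
      · rw [pv_key_eq d "tue" h2]
        simp [pvDayLoop, DAY_ABBREV_ORDERED, pvDayKeys,
            pv_ne d "mon" (by decide) h1,
            pv_starts_false d ['m', 'o', 'n'] (by decide) (by simpa using h1),
            pv_starts_true d ['t', 'u', 'e'] (by decide) (by simpa using h2)]
      ·
        by_cases h3 : d.toList.take 3 = "wed".toList
        · rw [pv_key_eq d "wed" h3]
          simp [pvDayLoop, DAY_ABBREV_ORDERED, pvDayKeys,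
              pv_ne d "mon" (by decide) h1,
              pv_starts_false d ['m', 'o', 'n'] (by decide) (by simpa using h1),
              pv_ne d "tue" (by decide) h2,
              pv_starts_false d ['t', 'u', 'e'] (by decide) (by simpa using h2),
              pv_starts_true d ['w', 'e', 'd'] (by decide) (by simpa using h3)]
        ·
          by_cases h4 : d.toList.take 3 = "thu".toList
          · rw [pv_key_eq d "thu" h4]
            simp [pvDayLoop, DAY_ABBREV_ORDERED, pvDayKeys,
                pv_ne d "mon" (by decide) h1,
                pv_starts_false d ['m', 'o', 'n'] (by decide) (by simpa using h1),
                pv_ne d "tue" (by decide) h2,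
                pv_starts_false d ['t', 'u', 'e'] (by decide) (by simpa using h2),
                pv_ne d "wed" (by decide) h3,
                pv_starts_false d ['w', 'e', 'd'] (by decide) (by simpa using h3),
                pv_starts_true d ['t', 'h', 'u'] (by decide) (by simpa using h4)]
          ·
            by_cases h5 : d.toList.take 3 = "fri".toList
            · rw [pv_key_eq d "fri" h5]
              simp [pvDayLoop, DAY_ABBREV_ORDERED, pvDayKeys,
                  pv_ne d "mon" (by decide) h1,
                  pv_starts_false d ['m', 'o', 'n'] (by decide) (by simpa using h1),
                  pv_ne d "tue" (by decide) h2,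
                  pv_starts_false d ['t', 'u', 'e'] (by decide) (by simpa using h2),
                  pv_ne d "wed" (by decide) h3,
                  pv_starts_false d ['w', 'e', 'd'] (by decide) (by simpa using h3),
                  pv_ne d "thu" (by decide) h4,
                  pv_starts_false d ['t', 'h', 'u'] (by decide) (by simpa using h4),
                  pv_starts_true d ['f', 'r', 'i'] (by decide) (by simpa using h5)]
            ·
              by_cases h6 : d.toList.take 3 = "sat".toList
              · rw [pv_key_eq d "sat" h6]
                simp [pvDayLoop, DAY_ABBREV_ORDERED, pvDayKeys,
                    pv_ne d "mon" (by decide) h1,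
                    pv_starts_false d ['m', 'o', 'n'] (by decide) (by simpa using h1),
                    pv_ne d "tue" (by decide) h2,
                    pv_starts_false d ['t', 'u', 'e'] (by decide) (by simpa using h2),
                    pv_ne d "wed" (by decide) h3,
                    pv_starts_false d ['w', 'e', 'd'] (by decide) (by simpa using h3),
                    pv_ne d "thu" (by decide) h4,
                    pv_starts_false d ['t', 'h', 'u'] (by decide) (by simpa using h4),
                    pv_ne d "fri" (by decide) h5,
                    pv_starts_false d ['f', 'r', 'i'] (by decide) (by simpa using h5),
                    pv_starts_true d ['s', 'a', 't'] (by decide) (by simpa using h6)]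
              ·
                by_cases h7 : d.toList.take 3 = "sun".toList
                · rw [pv_key_eq d "sun" h7]
                  simp [pvDayLoop, DAY_ABBREV_ORDERED, pvDayKeys,
                      pv_ne d "mon" (by decide) h1,
                      pv_starts_false d ['m', 'o', 'n'] (by decide) (by simpa using h1),
                      pv_ne d "tue" (by decide) h2,
                      pv_starts_false d ['t', 'u', 'e'] (by decide) (by simpa using h2),
                      pv_ne d "wed" (by decide) h3,
                      pv_starts_false d ['w', 'e', 'd'] (by decide) (by simpa using h3),
                      pv_ne d "thu" (by decide) h4,
                      pv_starts_false d ['t', 'h', 'u'] (by decide) (by simpa using h4),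
                      pv_ne d "fri" (by decide) h5,
                      pv_starts_false d ['f', 'r', 'i'] (by decide) (by simpa using h5),
                      pv_ne d "sat" (by decide) h6,
                      pv_starts_false d ['s', 'a', 't'] (by decide) (by simpa using h6),
                      pv_starts_true d ['s', 'u', 'n'] (by decide) (by simpa using h7)]
                ·
                  simp [pvDayLoop, DAY_ABBREV_ORDERED, pvDayKeys,
                      pv_ne d "mon" (by decide) h1,
                      pv_starts_false d ['m', 'o', 'n'] (by decide) (by simpa using h1),
                      pv_key_ne d "mon" h1,
                      pv_ne d "tue" (by decide) h2,
                      pv_starts_false d ['t', 'u', 'e'] (by decide) (by simpa using h2),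
                      pv_key_ne d "tue" h2,
                      pv_ne d "wed" (by decide) h3,
                      pv_starts_false d ['w', 'e', 'd'] (by decide) (by simpa using h3),
                      pv_key_ne d "wed" h3,
                      pv_ne d "thu" (by decide) h4,
                      pv_starts_false d ['t', 'h', 'u'] (by decide) (by simpa using h4),
                      pv_key_ne d "thu" h4,
                      pv_ne d "fri" (by decide) h5,
                      pv_starts_false d ['f', 'r', 'i'] (by decide) (by simpa using h5),
                      pv_key_ne d "fri" h5,
                      pv_ne d "sat" (by decide) h6,
                      pv_starts_false d ['s', 'a', 't'] (by decide) (by simpa using h6),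
                      pv_key_ne d "sat" h6,
                      pv_ne d "sun" (by decide) h7,
                      pv_starts_false d ['s', 'u', 'n'] (by decide) (by simpa using h7),
                      pv_key_ne d "sun" h7]

-- ===== VERDICT (by name: the statement is the Claim_ definition above) =====
theorem normalize_day_py_spec : Claim_equal_normalize_day_py := by
  intro day_str _
  unfold Spec_normalize_day_py normalize_day_py normalize_day_py_alt
  exact pv_core (pvRstripDot (PySem.Str.lower (PySem.Str.strip day_str)))
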